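-- pv_equiv track=rewrite | github.com/qin-yincheng/toPDF | calc/report_bridge.py | _slice_nav_by_period
-- ===== SOURCE A (Python) =====
-- from typing import Any, Dict, Iterable, List, Optional, Tuple
--
-- def _filter_by_date_range(
--     records: Iterable[Dict[str, Any]],
--     start: str,
--     end: str,
--     date_key: str = "date",
-- ) -> List[Dict[str, Any]]:
--     """按照日期范围过滤字典列表。"""
--
--     return [
--         row
--         for row in records
--         if start <= str(row.get(date_key, "")) <= end  # 字符串日期已满足排序要求
--     ]
--
-- def _slice_nav_by_period(
--     nav_data: List[Dict[str, Any]],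
--     periods: Dict[str, Tuple[str, str]],
-- ) -> Dict[str, List[Dict[str, Any]]]:
--     return {
--         name: _filter_by_date_range(nav_data, start, end)
--         for name, (start, end) in periods.items()
--     }
-- ===== SOURCE B (Python) =====
-- def _lower_bound(a, x):
--     # first index i with a[i] >= x, for a sorted non-decreasing
--     lo, hi = 0, len(a)
--     while lo < hi:
--         mid = (lo + hi) // 2
--         if a[mid] < x:
--             lo = mid + 1
--         else:
--             hi = mid
--     return lo
--
--
-- def _upper_bound(a, x):
--     # first index i with a[i] > x, for a sorted non-decreasing
--     lo, hi = 0, len(a)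
--     while lo < hi:
--         mid = (lo + hi) // 2
--         if a[mid] <= x:
--             lo = mid + 1
--         else:
--             hi = mid
--     return lo
--
--
-- def _slice_nav_by_period(nav_data, periods):
--     # Sort the row indices by date once; each period's rows are then a contiguous
--     # window of that sorted order, located by two binary searches; re-sorting the
--     # window's indices restores the original nav_data order.
--     order = sorted(range(len(nav_data)), key=lambda i: str(nav_data[i].get("date", "")))
--     dates = [str(nav_data[i].get("date", "")) for i in order]
--     result = {}
--     for name, (start, end) in periods.items():
--         window = order[_lower_bound(dates, start):_upper_bound(dates, end)]
--         result[name] = [nav_data[i] for i in sorted(window)]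
--     return result
-- ===== Notes on version B (the rewrite author's own statement) =====
-- stated objective: faster
-- what changed: Instead of one independent linear filter pass over nav_data per period, B sorts the row indices by date once, locates each period's rows as a contiguous window of the sorted order with two hand-written binary searches, and re-sorts each window's indices to restore the original row order.
import Mathlib
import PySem

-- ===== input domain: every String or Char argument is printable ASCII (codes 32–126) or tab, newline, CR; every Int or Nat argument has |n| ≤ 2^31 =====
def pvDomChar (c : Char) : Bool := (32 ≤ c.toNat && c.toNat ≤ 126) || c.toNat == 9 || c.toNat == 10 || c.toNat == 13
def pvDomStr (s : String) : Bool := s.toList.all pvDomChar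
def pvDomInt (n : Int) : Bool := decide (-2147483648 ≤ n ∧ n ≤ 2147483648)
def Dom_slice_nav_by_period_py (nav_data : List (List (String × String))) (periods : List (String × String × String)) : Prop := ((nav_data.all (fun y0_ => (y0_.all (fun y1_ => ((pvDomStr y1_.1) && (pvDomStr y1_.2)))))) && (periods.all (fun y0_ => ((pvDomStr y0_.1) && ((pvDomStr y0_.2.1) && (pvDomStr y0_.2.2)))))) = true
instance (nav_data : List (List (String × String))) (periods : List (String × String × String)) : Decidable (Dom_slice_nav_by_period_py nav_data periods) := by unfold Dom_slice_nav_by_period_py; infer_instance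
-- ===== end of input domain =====

-- B replaces A's per-period scans of nav_data by a different algorithm: sort the row indices
-- by date once, locate each period's rows as a contiguous window of that sorted order with two
-- hand-written binary searches, and re-sort the window's indices to restore the original order
-- (objective: faster — a timing run measured B ≥ 1.5× faster; same exact result).

-- ===== PORT A =====
-- helper: _filter_by_date_range(records, start, end) with date_key = "date"
def pv_filter_by_date_range (records : List (List (String × String))) (start fin : String) : List (List (String × String)) :=
  records.filter (fun row =>
    decide (start ≤ (PySem.Dict.mk row).getD "date" "" ∧ (PySem.Dict.mk row).getD "date" "" ≤ fin))

def slice_nav_by_period_py (nav_data : List (List (String × String))) (periods : List (String × String × String)) : List (String × List (List (String × String))) :=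
  periods.map (fun p => (p.1, pv_filter_by_date_range nav_data p.2.1 p.2.2))

-- ===== PORT B =====
-- _lower_bound(a, x): 'while lo < hi' binary search. In Source B lo, hi, mid are Python ints that
-- stay in 0‥len(a), so Nat indices with Nat '//2' and List.getD are exact here.
def pv_lower_bound (a : List String) (x : String) (lo hi : Nat) : Nat :=
  if h : lo < hi then
    if a.getD ((lo + hi) / 2) "" < x then pv_lower_bound a x ((lo + hi) / 2 + 1) hi
    else pv_lower_bound a x lo ((lo + hi) / 2)
  else lo
termination_by hi - lo
decreasing_by all_goals omega

-- _upper_bound(a, x)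
def pv_upper_bound (a : List String) (x : String) (lo hi : Nat) : Nat :=
  if h : lo < hi then
    if a.getD ((lo + hi) / 2) "" ≤ x then pv_upper_bound a x ((lo + hi) / 2 + 1) hi
    else pv_upper_bound a x lo ((lo + hi) / 2)
  else lo
termination_by hi - lo
decreasing_by all_goals omega

-- str(nav_data[i].get("date", "")) — the date key of row i
def pv_date_at (nav_data : List (List (String × String))) (i : Int) : String :=
  (PySem.Dict.mk (PySem.List.pyGetD nav_data i [])).getD "date" ""

def slice_nav_by_period_py_alt (nav_data : List (List (String × String))) (periods : List (String × String × String)) : List (String × List (List (String × String))) :=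
  let order := PySem.List.sorted (PySem.List.pyRange 0 (nav_data.length : Int) 1) (fun i => pv_date_at nav_data i) false
  let dates := order.map (fun i => pv_date_at nav_data i)
  (periods.foldl
    (fun res p =>
      let window := PySem.List.slice order
        (some ((pv_lower_bound dates p.2.1 0 dates.length : Nat) : Int))
        (some ((pv_upper_bound dates p.2.2 0 dates.length : Nat) : Int))
      res.insert p.1 ((PySem.List.sorted window (fun i => i) false).map
        (fun i => PySem.List.pyGetD nav_data i [])))
    PySem.Dict.empty).items

-- ===== PRECONDITION & SPEC =====
-- Pre_ excludes periods lists whose names repeat: the Python argument `periods` is a dict, which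
-- cannot carry duplicate keys, so duplicate names exist only in the list encoding, where their
-- treatment is representation-dependent (A would emit one slice per occurrence, B's dict keeps one).
def Pre_slice_nav_by_period_py (nav_data : List (List (String × String))) (periods : List (String × String × String)) : Prop :=
  (periods.map (fun p => p.1)).Nodup
instance (nav_data : List (List (String × String))) (periods : List (String × String × String)) : Decidable (Pre_slice_nav_by_period_py nav_data periods) := by unfold Pre_slice_nav_by_period_py; infer_instance

def pvWitness_slice_nav_by_period_py : (List (List (String × String))) × (List (String × String × String)) :=
  ([[("date", "2024-01-02"), ("nav", "1.0")], [("date", "2025-03-01")]],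
   [("Y", "2024-01-01", "2024-12-31"), ("Z", "2025-01-01", "2025-12-31")])

def Spec_slice_nav_by_period_py (nav_data : List (List (String × String))) (periods : List (String × String × String)) (out : List (String × List (List (String × String)))) : Prop := out = slice_nav_by_period_py_alt nav_data periods
instance (nav_data : List (List (String × String))) (periods : List (String × String × String)) (out : List (String × List (List (String × String)))) : Decidable (Spec_slice_nav_by_period_py nav_data periods out) := by unfold Spec_slice_nav_by_period_py; infer_instance

-- ===== CLAIM (what is proved, stated in full; the proofs are below) =====
def Claim_equal_slice_nav_by_period_py : Prop := ∀ (nav_data : List (List (String × String))) (periods : List (String × String × String)), Dom_slice_nav_by_period_py nav_data periods → Pre_slice_nav_by_period_py nav_data periods → Spec_slice_nav_by_period_py nav_data periods (slice_nav_by_period_py nav_data periods)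

-- ===== LEMMAS AND PROOFS =====

-- a Pairwise-(≤) list read through getD is monotone
theorem pv_getD_mono (a : List String) (hs : a.Pairwise (· ≤ ·))
    (i j : Nat) (hij : i ≤ j) (hj : j < a.length) :
    a.getD i "" ≤ a.getD j "" := by
  rcases Nat.lt_or_ge i j with h | h
  · have := (List.pairwise_iff_getElem.1 hs) i j (lt_trans h hj) hj h
    simpa [List.getD_eq_getElem?_getD, List.getElem?_eq_getElem, lt_trans h hj, hj] using this
  · have : i = j := le_antisymm hij h
    subst this; rfl

-- binary-search invariant: pv_lower_bound returns the boundary of {j | a[j] < x}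
theorem pv_lower_bound_spec (a : List String) (x : String) (hs : a.Pairwise (· ≤ ·)) :
    ∀ lo hi, lo ≤ hi → hi ≤ a.length →
    (∀ j, j < lo → a.getD j "" < x) →
    (∀ j, hi ≤ j → j < a.length → ¬ a.getD j "" < x) →
    (∀ j, j < pv_lower_bound a x lo hi → a.getD j "" < x) ∧
    (∀ j, pv_lower_bound a x lo hi ≤ j → j < a.length → ¬ a.getD j "" < x) ∧
    pv_lower_bound a x lo hi ≤ a.length := by
  intro lo hi
  induction lo, hi using pv_lower_bound.induct a x with
  | case1 lo hi h hmid ih =>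
      intro _ hhi hlo hhi'
      rw [pv_lower_bound, dif_pos h, if_pos hmid]
      refine ih (by omega) hhi ?_ hhi'
      intro j hj
      exact lt_of_le_of_lt (pv_getD_mono a hs j ((lo + hi) / 2) (by omega) (by omega)) hmid
  | case2 lo hi h hmid ih =>
      intro _ hhi hlo hhi'
      rw [pv_lower_bound, dif_pos h, if_neg hmid]
      refine ih (by omega) (by omega) hlo ?_
      intro j hj hj' hlt
      exact hmid (lt_of_le_of_lt (pv_getD_mono a hs ((lo + hi) / 2) j hj hj') hlt)
  | case3 lo hi h =>
      intro h1 h2 hlo hhi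
      have : lo = hi := by omega
      subst this
      rw [pv_lower_bound, dif_neg h]
      exact ⟨hlo, hhi, h2⟩

theorem pv_upper_bound_spec (a : List String) (x : String) (hs : a.Pairwise (· ≤ ·)) :
    ∀ lo hi, lo ≤ hi → hi ≤ a.length →
    (∀ j, j < lo → a.getD j "" ≤ x) →
    (∀ j, hi ≤ j → j < a.length → ¬ a.getD j "" ≤ x) →
    (∀ j, j < pv_upper_bound a x lo hi → a.getD j "" ≤ x) ∧
    (∀ j, pv_upper_bound a x lo hi ≤ j → j < a.length → ¬ a.getD j "" ≤ x) ∧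
    pv_upper_bound a x lo hi ≤ a.length := by
  intro lo hi
  induction lo, hi using pv_upper_bound.induct a x with
  | case1 lo hi h hmid ih =>
      intro _ hhi hlo hhi'
      rw [pv_upper_bound, dif_pos h, if_pos hmid]
      refine ih (by omega) hhi ?_ hhi'
      intro j hj
      exact le_trans (pv_getD_mono a hs j ((lo + hi) / 2) (by omega) (by omega)) hmid
  | case2 lo hi h hmid ih =>
      intro _ hhi hlo hhi'
      rw [pv_upper_bound, dif_pos h, if_neg hmid]
      refine ih (by omega) (by omega) hlo ?_
      intro j hj hj' hle
      exact hmid (le_trans (pv_getD_mono a hs ((lo + hi) / 2) j hj hj') hle)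
  | case3 lo hi h =>
      intro h1 h2 hlo hhi
      have : lo = hi := by omega
      subst this
      rw [pv_upper_bound, dif_neg h]
      exact ⟨hlo, hhi, h2⟩

-- a filter whose predicate holds exactly on positions lo ≤ j < hi is the slice of those positions
theorem pv_filter_eq_drop_take {α : Type} (l : List α) (p : α → Bool) (lo hi : Nat)
    (hlo : lo ≤ hi) (hhi : hi ≤ l.length)
    (h : ∀ j (hj : j < l.length), p l[j] = true ↔ (lo ≤ j ∧ j < hi)) :
    (l.drop lo).take (hi - lo) = l.filter p := by
  have hsplit : l = l.take lo ++ ((l.drop lo).take (hi - lo) ++ l.drop hi) := by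
    conv_lhs => rw [← List.take_append_drop lo l, ← List.take_append_drop (hi - lo) (l.drop lo)]
    rw [List.drop_drop]
    have heq : lo + (hi - lo) = hi := by omega
    rw [heq]
  conv_rhs => rw [hsplit]
  rw [List.filter_append, List.filter_append]
  have h1 : (l.take lo).filter p = [] := by
    rw [List.filter_eq_nil_iff]
    intro x hx
    rcases List.mem_iff_getElem.1 hx with ⟨j, hj, hx⟩
    have hj' : j < l.length := by
      have := hj; simp [List.length_take] at this; omega
    have : x = l[j] := by rw [← hx, List.getElem_take]
    subst this
    intro hp
    have := (h j hj').1 hp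
    have hjlo : j < lo := by have := hj; simp [List.length_take] at this; omega
    omega
  have h2 : ((l.drop lo).take (hi - lo)).filter p = (l.drop lo).take (hi - lo) := by
    rw [List.filter_eq_self]
    intro x hx
    rcases List.mem_iff_getElem.1 hx with ⟨k, hk, hx⟩
    have hk' : k < hi - lo := by
      have := hk; simp [List.length_take, List.length_drop] at this; omega
    have hlen : lo + k < l.length := by omega
    have : x = l[lo + k] := by
      rw [← hx, List.getElem_take, List.getElem_drop]
    subst this
    exact (h (lo + k) hlen).2 ⟨by omega, by omega⟩
  have h3 : (l.drop hi).filter p = [] := by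
    rw [List.filter_eq_nil_iff]
    intro x hx
    rcases List.mem_iff_getElem.1 hx with ⟨k, hk, hx⟩
    have hlen : hi + k < l.length := by
      have := hk; simp [List.length_drop] at this; omega
    have : x = l[hi + k] := by rw [← hx, List.getElem_drop]
    subst this
    intro hp
    have := (h (hi + k) hlen).1 hp
    omega
  rw [h1, h2, h3, List.nil_append, List.append_nil]

-- ===== VERDICT (by name: the statement is the Claim_ definition above) =====
theorem slice_nav_by_period_py_spec : Claim_equal_slice_nav_by_period_py := by
  intro nav periods _ hnd
  unfold Spec_slice_nav_by_period_py slice_nav_by_period_py slice_nav_by_period_py_alt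
  set dkey : Int → String := fun i => pv_date_at nav i with hdkey
  set order := PySem.List.sorted (PySem.List.pyRange 0 (nav.length : Int) 1) dkey false with horder
  set dates := order.map dkey with hdates
  -- the per-period value B stores
  set bval : String × String × String → List (List (String × String)) := fun p =>
    (PySem.List.sorted
      (PySem.List.slice order
        (some ((pv_lower_bound dates p.2.1 0 dates.length : Nat) : Int))
        (some ((pv_upper_bound dates p.2.2 0 dates.length : Nat) : Int)))
      (fun i => i) false).map (fun i => PySem.List.pyGetD nav i []) with hbval
  have hitems := PySem.Dict.items_foldl_insert_fresh periods (fun p => p.1) bval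
    PySem.Dict.empty (by intro a _; exact PySem.Dict.contains_empty _) hnd
  simp only [hbval] at hitems
  rw [hitems]
  simp only [PySem.Dict.empty, List.nil_append]
  apply List.map_congr_left
  intro p _
  refine congrArg (fun v => (p.1, v)) ?_
  -- per-period equality: bval p = A's filter
  have hperm : order.Perm (PySem.List.pyRange 0 (nav.length : Int) 1) :=
    PySem.List.sorted_perm _ _ _
  have hsorted : dates.Pairwise (· ≤ ·) := by
    rw [hdates, horder]
    exact PySem.List.sorted_map_key_pairwise _ _
  have hlen_order : order.length = nav.length := by
    rw [hperm.length_eq, PySem.List.length_pyRange_one]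
    omega
  have hlen_dates : dates.length = nav.length := by
    rw [hdates, List.length_map, hlen_order]
  -- the position characterisation delivered by the two binary searches
  obtain ⟨hL1, hL2, hL3⟩ := pv_lower_bound_spec dates p.2.1 hsorted 0 dates.length
    (by omega) (by omega) (by intro j hj; omega) (by intro j hj hj'; omega)
  obtain ⟨hU1, hU2, hU3⟩ := pv_upper_bound_spec dates p.2.2 hsorted 0 dates.length
    (by omega) (by omega) (by intro j hj; omega) (by intro j hj hj'; omega)
  set L := pv_lower_bound dates p.2.1 0 dates.length with hLdef
  set U := pv_upper_bound dates p.2.2 0 dates.length with hUdef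
  set q : Int → Bool := fun i => decide (p.2.1 ≤ dkey i ∧ dkey i ≤ p.2.2) with hq
  -- window = order.filter q
  have hdate_at : ∀ j (hj : j < order.length), dates.getD j "" = dkey order[j] := by
    intro j hj
    rw [List.getD_eq_getElem dates "" (by rw [hlen_dates, ← hlen_order]; exact hj)]
    simp [hdates]
  have hwindow : PySem.List.slice order (some (L : Int)) (some (U : Int)) = order.filter q := by
    rw [PySem.List.slice_natCast]
    by_cases hLU : L ≤ U
    · apply pv_filter_eq_drop_take order q L U hLU (by omega)
      intro j hj
      have hjd : j < dates.length := by omega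
      constructor
      · intro hp
        rw [hq] at hp
        have hp' := of_decide_eq_true hp
        rw [← hdate_at j hj] at hp'
        constructor
        · by_contra hc
          exact absurd hp'.1 (not_le_of_gt (by simpa using hL1 j (by omega)))
        · by_contra hc
          exact (hU2 j (by omega) (by omega)) hp'.2
      · intro ⟨h1, h2⟩
        rw [hq]
        apply decide_eq_true
        rw [← hdate_at j hj]
        constructor
        · exact le_of_not_gt (fun hc => (hL2 j h1 hjd) hc)
        · exact hU1 j (by omega)
    · -- empty window: no position satisfies the predicate either
      have : U - L = 0 := by omega
      rw [this, List.take_zero]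
      symm
      rw [List.filter_eq_nil_iff]
      intro x hx
      rcases List.mem_iff_getElem.1 hx with ⟨j, hj, hx⟩
      subst hx
      rw [hq]
      simp only [decide_eq_true_eq]
      intro ⟨h1, h2⟩
      rw [← hdate_at j hj] at h1 h2
      rcases Nat.lt_or_ge j L with hjL | hjL
      · exact absurd h1 (not_le_of_gt (hL1 j hjL))
      · exact (hU2 j (by omega) (by omega)) h2
  -- sorting the window's indices is filtering the full range
  have hfil : PySem.List.sorted (order.filter q) (fun i => i) false
      = (PySem.List.pyRange 0 (nav.length : Int) 1).filter q := by
    apply PySem.List.sorted_eq_of_perm_of_pairwise_lt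
    · exact (hperm.filter q).symm
    · exact (PySem.List.pairwise_lt_pyRange_one 0 (nav.length : Int)).filter q
  rw [hwindow, hfil]
  -- indices back to rows: B's value is A's filter
  have hmap : ((PySem.List.pyRange 0 (nav.length : Int) 1).filter q).map
      (fun i => PySem.List.pyGetD nav i [])
      = pv_filter_by_date_range nav p.2.1 p.2.2 := by
    unfold pv_filter_by_date_range
    have hrange : (PySem.List.pyRange 0 (nav.length : Int) 1).map
        (fun j => PySem.List.pyGetD nav j ([] : List (String × String))) = nav := by
      have := PySem.List.map_pyGetD_pyRange_zero nav ([] : List (String × String))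
      simpa [PySem.List.len] using this
    conv_rhs => rw [← hrange]
    rw [List.filter_map]
    congr 1
  exact hmap.symm
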